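-- pv_equiv track=rewrite | github.com/lsfusion/samples | documentation/src/main/main.py | add_nbsp
-- ===== SOURCE A (Python) =====
-- def add_nbsp(text):
--     result = ""
--     inside_tag = False
--     for c in text:
--         if not inside_tag and c == ' ':
--             result += '&nbsp;'
--         else:
--             result += c
--             if c == '>':
--                 inside_tag = False
--             elif c == '<':
--                 inside_tag = True
--     return result
-- ===== SOURCE B (Python) =====
-- def add_nbsp(text):
--     parts = []
--     rest = text
--     while rest:
--         pre, lt, rest = rest.partition('<')
--         parts.append(pre.replace(' ', '&nbsp;'))
--         if lt:
--             tag, gt, rest = rest.partition('>')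
--             parts.append(lt + tag + gt)
--     return ''.join(parts)
-- ===== Notes on version B (the rewrite author's own statement) =====
-- stated objective: faster
-- what changed: Replaced the character-by-character inside_tag state machine with partition-based segment processing: repeatedly split off the text before the next tag opener, replace its spaces via str.replace, copy the tag (or an unclosed tag tail) verbatim, and join the pieces.
import Mathlib
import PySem

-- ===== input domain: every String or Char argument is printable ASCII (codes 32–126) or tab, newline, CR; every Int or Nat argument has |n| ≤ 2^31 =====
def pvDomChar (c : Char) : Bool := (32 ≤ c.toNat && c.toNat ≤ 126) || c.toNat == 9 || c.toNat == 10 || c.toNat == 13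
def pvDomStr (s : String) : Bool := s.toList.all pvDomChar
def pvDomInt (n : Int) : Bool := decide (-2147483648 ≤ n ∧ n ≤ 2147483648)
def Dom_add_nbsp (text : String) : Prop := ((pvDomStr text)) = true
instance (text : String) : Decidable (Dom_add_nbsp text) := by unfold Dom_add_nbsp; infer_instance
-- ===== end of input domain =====

-- B replaces A's char-by-char state machine by partition-based segment processing
-- (split off the text up to each '<', replace spaces there, copy each tag segment
-- verbatim); objective: faster (bulk string operations instead of a per-character Python loop).

-- ===== PORT A =====
-- the loop body of A: on state (result, inside_tag) process one character c
def addNbspStep (st : String × Bool) (c : Char) : String × Bool :=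
  if !st.2 && c == ' ' then (st.1 ++ "&nbsp;", st.2)
  else (st.1.push c, if c == '>' then false else if c == '<' then true else st.2)

def add_nbsp (text : String) : String :=
  (text.toList.foldl addNbspStep ("", false)).1

-- ===== PORT B =====
-- B's loop: while rest: pre,lt,rest = rest.partition('<'); append pre.replace(' ','&nbsp;');
--           if lt: tag,gt,rest = rest.partition('>'); append lt+tag+gt.
-- str.partition(ch) is ported as takeWhile/dropWhile at the separating character,
-- str.replace as PySem.Chars.replace (exact), ''.join(parts) as the ++ of the pieces.
def altGo (cs : List Char) : List Char :=
  if cs.isEmpty then []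
  else
    PySem.Chars.replace (cs.takeWhile (fun c => c ≠ '<')) [' '] "&nbsp;".toList ++
      match h : cs.dropWhile (fun c => c ≠ '<') with
      | [] => []
      | lt :: r =>
        match h2 : r.dropWhile (fun c => c ≠ '>') with
        | [] => lt :: r.takeWhile (fun c => c ≠ '>')
        | gt :: r3 => lt :: (r.takeWhile (fun c => c ≠ '>') ++ gt :: altGo r3)
termination_by cs.length
decreasing_by
  have a1 : (cs.dropWhile (fun c => c ≠ '<')).length ≤ cs.length :=
    List.length_dropWhile_le _ _
  have a2 : (r.dropWhile (fun c => c ≠ '>')).length ≤ r.length :=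
    List.length_dropWhile_le _ _
  rw [h] at a1; rw [h2] at a2; simp at a1 a2; omega

def add_nbsp_alt (text : String) : String := String.ofList (altGo text.toList)

-- ===== PRECONDITION & SPEC =====
def Spec_add_nbsp (text : String) (out : String) : Prop := out = add_nbsp_alt text
instance (text : String) (out : String) : Decidable (Spec_add_nbsp text out) := by unfold Spec_add_nbsp; infer_instance

-- ===== CLAIM (what is proved, stated in full; the proofs are below) =====
def Claim_equal_add_nbsp : Prop := ∀ (text : String), Dom_add_nbsp text → Spec_add_nbsp text (add_nbsp text)

-- ===== LEMMAS AND PROOFS =====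

-- the character list A's fold appends after a given inside_tag state
def goA (b : Bool) : List Char → List Char
  | [] => []
  | c :: cs =>
      if !b && c = ' ' then "&nbsp;".toList ++ goA b cs
      else c :: goA (if c = '>' then false else if c = '<' then true else b) cs

theorem foldA_toList (cs : List Char) : ∀ (acc : String) (b : Bool),
    (cs.foldl addNbspStep (acc, b)).1.toList = acc.toList ++ goA b cs := by
  induction cs with
  | nil => intro acc b; simp [goA]
  | cons c cs ih =>
      intro acc b
      simp only [List.foldl_cons, addNbspStep, goA]
      by_cases hb : (!b && c == ' ') = true
      · simp only [hb, if_pos]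
        have : (!b && c = ' ') = true := by
          simpa using hb
        rw [this, if_pos rfl, ih]
        simp
      · simp only [hb, if_neg, Bool.false_eq_true, not_false_iff, if_neg]
        have : (!b && c = ' ') = false := by
          simpa using hb
        rw [this]
        simp only [Bool.false_eq_true, if_false, ih]
        simp

-- single-character str.replace is character-wise substitution
theorem replace_go_space (NB : List Char) : ∀ (l : List Char) (fuel : Nat) (acc : List Char),
    l.length ≤ fuel →
    PySem.Chars.replace.go [' '] NB fuel l acc =
      acc.reverse ++ l.flatMap (fun c => if c = ' ' then NB else [c]) := by
  intro l
  induction l with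
  | nil =>
      intro fuel acc _
      cases fuel <;> simp [PySem.Chars.replace.go]
  | cons c t ih =>
      intro fuel acc hf
      cases fuel with
      | zero => simp at hf
      | succ f =>
          simp only [PySem.Chars.replace.go]
          by_cases hc : c = ' '
          · subst hc
            simp [List.isPrefixOf, ih f _ (by simpa using hf)]
          · have : ([' '].isPrefixOf (c :: t)) = false := by
              simp [List.isPrefixOf]
              intro h; exact absurd h.symm hc
            simp [this, ih f _ (by simpa using hf), hc]

theorem replace_space (l : List Char) (NB : List Char) :
    PySem.Chars.replace l [' '] NB = l.flatMap (fun c => if c = ' ' then NB else [c]) := by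
  rw [PySem.Chars.replace]
  simp [replace_go_space NB l l.length [] (le_refl _)]

-- outside a tag, a prefix without '<' is substituted character-wise
theorem goA_false_append (pre rest : List Char) (hpre : ∀ c ∈ pre, c ≠ '<') :
    goA false (pre ++ rest) =
      pre.flatMap (fun c => if c = ' ' then "&nbsp;".toList else [c]) ++ goA false rest := by
  induction pre with
  | nil => simp
  | cons c t ih =>
      have hc : c ≠ '<' := hpre c (by simp)
      have ht : ∀ x ∈ t, x ≠ '<' := fun x hx => hpre x (by simp [hx])
      by_cases hcsp : c = ' '
      · subst hcsp
        simp [goA, ih ht]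
      · simp only [List.cons_append, goA, Bool.not_false, Bool.true_and]
        rw [if_neg (by simpa using hcsp)]
        by_cases hgt : c = '>'
        · subst hgt; simp [ih ht]
        · rw [if_neg hgt, if_neg hc, ih ht]
          simp [hcsp]

-- inside a tag, characters up to '>' are copied verbatim
theorem goA_true_append (tag rest : List Char) (htag : ∀ c ∈ tag, c ≠ '>') :
    goA true (tag ++ rest) = tag ++ goA true rest := by
  induction tag with
  | nil => simp
  | cons c t ih =>
      have hc : c ≠ '>' := htag c (by simp)
      have ht : ∀ x ∈ t, x ≠ '>' := fun x hx => htag x (by simp [hx])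
      simp only [List.cons_append, goA, Bool.not_true, Bool.false_and, Bool.false_eq_true,
        if_false]
      rw [if_neg hc]
      by_cases hlt : c = '<'
      · subst hlt; simp [ih ht]
      · rw [if_neg hlt, ih ht]

theorem dropWhile_head_false {a : Type} (p : a → Bool) :
    ∀ (l : List a) (x : a) (xs : List a), l.dropWhile p = x :: xs → p x = false := by
  intro l
  induction l with
  | nil => simp
  | cons c t ih =>
      intro x xs h
      by_cases hp : p c
      · rw [List.dropWhile_cons_of_pos hp] at h
        exact ih x xs h
      · rw [List.dropWhile_cons_of_neg hp] at h
        cases h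
        simpa using hp

theorem goA_eq_altGo (cs : List Char) : goA false cs = altGo cs := by
  induction cs using altGo.induct with
  | case1 cs hemp =>
      have : cs = [] := by simpa using hemp
      subst this; simp [goA, altGo]
  | case2 cs hemp ih =>
      rw [altGo, if_neg hemp]
      conv_lhs => rw [← List.takeWhile_append_dropWhile (p := fun c => decide (c ≠ '<')) (l := cs)]
      rw [goA_false_append _ _ (fun c hc => by simpa using List.mem_takeWhile_imp hc),
        replace_space]
      congr 1
      split
      · next heq => rw [heq]; rfl
      · next lt r heq =>
          have hlt : lt = '<' := by
            have := dropWhile_head_false _ cs lt r heq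
            simpa using this
          subst hlt
          rw [heq]
          have step1 : goA false ('<' :: r) = '<' :: goA true r := by simp [goA]
          rw [step1]
          conv_lhs =>
            rw [← List.takeWhile_append_dropWhile (p := fun c => decide (c ≠ '>')) (l := r)]
          rw [goA_true_append _ _ (fun c hc => by simpa using List.mem_takeWhile_imp hc)]
          split
          · next heq2 => rw [heq2]; simp [goA]
          · next gt r3 heq2 =>
              have hgt : gt = '>' := by
                have := dropWhile_head_false _ r gt r3 heq2
                simpa using this
              subst hgt
              rw [heq2]
              have step2 : goA true ('>' :: r3) = '>' :: goA false r3 := by simp [goA]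
              rw [step2, ih _ _ heq _ _ heq2]

-- ===== VERDICT (by name: the statement is the Claim_ definition above) =====
theorem add_nbsp_spec : Claim_equal_add_nbsp := by
  intro text _
  unfold Spec_add_nbsp add_nbsp add_nbsp_alt
  apply String.toList_inj.mp
  rw [foldA_toList, goA_eq_altGo]
  simp
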